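-- pv_equiv track=rewrite | github.com/Emilp10/RL_multi_drone_rescue | multi_drone_rescue/environment/utils.py | fov_cells
-- ===== SOURCE A (Python) =====
-- from typing import List, Tuple, Set
--
-- Coord = Tuple[int, int]
--
-- def manhattan(a: Coord, b: Coord) -> int:
--     return abs(a[0] - b[0]) + abs(a[1] - b[1])
--
-- def in_bounds(pos: Coord, size: int) -> bool:
--     x, y = pos
--     return 0 <= x < size and 0 <= y < size
--
-- def fov_cells(center: Coord, radius: int, size: int) -> List[Coord]:
--     cx, cy = center
--     cells = []
--     for x in range(cx - radius, cx + radius + 1):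
--         for y in range(cy - radius, cy + radius + 1):
--             if in_bounds((x, y), size) and manhattan((cx, cy), (x, y)) <= radius:
--                 cells.append((x, y))
--     return cells
-- ===== SOURCE B (Python) =====
-- from typing import List, Tuple
--
-- Coord = Tuple[int, int]
--
-- def fov_cells(center: Coord, radius: int, size: int) -> List[Coord]:
--     cx, cy = center
--     return [(x, y)
--             for x in range(max(cx - radius, 0), min(cx + radius, size - 1) + 1)
--             for dy in (radius - abs(x - cx),)
--             for y in range(max(cy - dy, 0), min(cy + dy, size - 1) + 1)]
-- ===== Notes on version B (the rewrite author's own statement) =====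
-- stated objective: simpler
-- what changed: B is a single list comprehension over x and y ranges whose endpoints are pre-clamped to the grid with max/min (row span dy = radius - |x - cx| intersected with [0, size)), so only the emitted cells are iterated and both the per-cell in_bounds test and the manhattan() distance test are eliminated; A's scan-and-filter over the full (2r+1)^2 box disappears.
import Mathlib
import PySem

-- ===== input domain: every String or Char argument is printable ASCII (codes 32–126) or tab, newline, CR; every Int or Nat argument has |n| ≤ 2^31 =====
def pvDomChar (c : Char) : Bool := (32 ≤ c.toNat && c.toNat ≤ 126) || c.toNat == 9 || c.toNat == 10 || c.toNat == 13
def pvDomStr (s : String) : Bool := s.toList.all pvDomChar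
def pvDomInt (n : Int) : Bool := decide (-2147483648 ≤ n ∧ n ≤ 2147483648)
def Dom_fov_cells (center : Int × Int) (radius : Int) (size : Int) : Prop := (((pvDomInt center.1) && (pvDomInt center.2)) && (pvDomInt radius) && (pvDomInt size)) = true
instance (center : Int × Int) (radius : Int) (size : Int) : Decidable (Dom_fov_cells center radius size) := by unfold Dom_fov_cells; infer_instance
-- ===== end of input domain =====

-- B builds the answer as one comprehension over ranges pre-clamped to the grid by max/min,
-- so both the in_bounds test and the manhattan() test disappear: simpler, no per-cell filtering.

-- ===== PORT A =====
def manhattan (a b : Int × Int) : Int := |a.1 - b.1| + |a.2 - b.2|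

def in_bounds (pos : Int × Int) (size : Int) : Bool :=
  decide (0 ≤ pos.1 ∧ pos.1 < size) && decide (0 ≤ pos.2 ∧ pos.2 < size)

def fov_cells (center : Int × Int) (radius : Int) (size : Int) : List (Int × Int) :=
  (PySem.List.pyRange (center.1 - radius) (center.1 + radius + 1) 1).foldl (fun cells x =>
    (PySem.List.pyRange (center.2 - radius) (center.2 + radius + 1) 1).foldl (fun cells y =>
      if in_bounds (x, y) size && decide (manhattan (center.1, center.2) (x, y) ≤ radius)
      then cells ++ [(x, y)] else cells) cells) []

-- ===== PORT B =====
def fov_cells_alt (center : Int × Int) (radius : Int) (size : Int) : List (Int × Int) :=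
  (PySem.List.pyRange (max (center.1 - radius) 0) (min (center.1 + radius) (size - 1) + 1) 1).flatMap
    (fun x =>
      let dy := radius - |x - center.1|
      (PySem.List.pyRange (max (center.2 - dy) 0) (min (center.2 + dy) (size - 1) + 1) 1).map
        (fun y => (x, y)))

-- ===== PRECONDITION & SPEC =====
def Spec_fov_cells (center : Int × Int) (radius : Int) (size : Int) (out : List (Int × Int)) : Prop := out = fov_cells_alt center radius size
instance (center : Int × Int) (radius : Int) (size : Int) (out : List (Int × Int)) : Decidable (Spec_fov_cells center radius size out) := by unfold Spec_fov_cells; infer_instance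

-- ===== CLAIM =====
def Claim_equal_fov_cells : Prop := ∀ (center : Int × Int) (radius : Int) (size : Int), Dom_fov_cells center radius size → Spec_fov_cells center radius size (fov_cells center radius size)

-- ===== LEMMAS AND PROOFS =====

-- Filtering an increasing range by an interval condition is the clamped range.
theorem pv_filter_range (c d : Int) : ∀ (n : Nat) (a b : Int), (b - a).toNat = n →
    (PySem.List.pyRange a b 1).filter (fun y => decide (c ≤ y ∧ y < d))
      = PySem.List.pyRange (max a c) (min b d) 1 := by
  intro n
  induction n with
  | zero =>
    intro a b h
    rw [PySem.List.pyRange_one_eq_nil (by omega), PySem.List.pyRange_one_eq_nil (by omega)]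
    rfl
  | succ n ih =>
    intro a b h
    have hab : a < b := by omega
    rw [PySem.List.pyRange_one_cons hab]
    by_cases hc : c ≤ a
    · by_cases hd : a < d
      · simp only [List.filter_cons, decide_eq_true_eq]
        rw [if_pos ⟨hc, hd⟩, ih (a + 1) b (by omega)]
        rw [show max a c = a from by omega,
            PySem.List.pyRange_one_cons (show a < min b d by omega),
            show max (a + 1) c = a + 1 from by omega]
      · simp only [List.filter_cons, decide_eq_true_eq]
        rw [if_neg (by omega), ih (a + 1) b (by omega),
            PySem.List.pyRange_one_eq_nil (by omega), PySem.List.pyRange_one_eq_nil (by omega)]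
    · simp only [List.filter_cons, decide_eq_true_eq]
      rw [if_neg (by omega), ih (a + 1) b (by omega)]
      have : max (a + 1) c = max a c := by omega
      rw [this]

-- flatMap ignores elements the predicate rejects when those elements produce [].
theorem pv_flatMap_filter {α β : Type} (p : α → Bool) (g : α → List β) :
    ∀ (l : List α), (∀ x ∈ l, p x = false → g x = []) → l.flatMap g = (l.filter p).flatMap g := by
  intro l
  induction l with
  | nil => intro _; rfl
  | cons a t ih =>
    intro h
    rw [List.flatMap_cons, List.filter_cons]
    by_cases hp : p a = true
    · rw [if_pos hp, List.flatMap_cons, ih (fun x hx => h x (List.mem_cons_of_mem a hx))]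
    · rw [if_neg hp, h a List.mem_cons_self (Bool.eq_false_iff.mpr hp),
          ih (fun x hx => h x (List.mem_cons_of_mem a hx)), List.nil_append]

theorem pv_flatMap_congr {α β : Type} (f g : α → List β) :
    ∀ (l : List α), (∀ x ∈ l, f x = g x) → l.flatMap f = l.flatMap g := by
  intro l
  induction l with
  | nil => intro _; rfl
  | cons a t ih =>
    intro h
    rw [List.flatMap_cons, List.flatMap_cons, h a List.mem_cons_self,
        ih (fun x hx => h x (List.mem_cons_of_mem a hx))]

theorem fov_cells_eq (center : Int × Int) (radius : Int) (size : Int) :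
    fov_cells center radius size = fov_cells_alt center radius size := by
  obtain ⟨cx, cy⟩ := center
  unfold fov_cells fov_cells_alt
  simp only [PySem.List.foldl_append_if, PySem.List.foldl_append_eq_flatMap, List.nil_append]
  rw [pv_flatMap_filter (fun x => decide (0 ≤ x ∧ x < size)) _ _ ?hnil]
  case hnil =>
    intro x _ hx
    rw [List.filter_eq_nil_iff.mpr ?_, List.map_nil]
    intro y _
    simp only [in_bounds, decide_eq_false_iff_not] at hx ⊢
    simp [hx]
  rw [pv_filter_range 0 size ((cx + radius + 1) - (cx - radius)).toNat (cx - radius) (cx + radius + 1) rfl]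
  have hb : min (cx + radius + 1) size = min (cx + radius) (size - 1) + 1 := by omega
  rw [hb]
  apply pv_flatMap_congr
  intro x hx
  obtain ⟨hx1, hx2⟩ := PySem.List.mem_pyRange_one.mp hx
  have hx0 : 0 ≤ x ∧ x < size := by constructor <;> omega
  have hxr : cx - radius ≤ x ∧ x ≤ cx + radius := by constructor <;> omega
  congr 1
  rw [List.filter_congr (q := fun y =>
        decide (max (cy - (radius - |x - cx|)) 0 ≤ y ∧ y < min (cy + (radius - |x - cx|)) (size - 1) + 1)) ?_]
  · rw [pv_filter_range _ _ ((cy + radius + 1) - (cy - radius)).toNat (cy - radius) (cy + radius + 1) rfl]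
    have ht0 : 0 ≤ |x - cx| := abs_nonneg _
    have htr : |x - cx| ≤ radius := by
      rcases abs_cases (x - cx) with ⟨e, _⟩ | ⟨e, _⟩ <;> omega
    congr 1 <;> [skip; skip] <;>
      · generalize hgen : |x - cx| = t at ht0 htr ⊢
        omega
  · intro y _
    rw [Bool.eq_iff_iff]
    simp only [in_bounds, manhattan, Bool.and_eq_true, decide_eq_true_eq]
    rcases abs_cases (cx - x) with ⟨e1, _⟩ | ⟨e1, _⟩ <;>
      rcases abs_cases (cy - y) with ⟨e2, _⟩ | ⟨e2, _⟩ <;>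
        rcases abs_cases (x - cx) with ⟨e3, _⟩ | ⟨e3, _⟩ <;>
          rw [e1, e2, e3] <;> omega

-- ===== VERDICT =====
theorem fov_cells_spec : Claim_equal_fov_cells := by
  intro center radius size _
  unfold Spec_fov_cells
  exact fov_cells_eq center radius size
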